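-- pv_equiv track=rewrite | github.com/christianvuye/py_micro_exercises | dsa/spaced_repetition/user_activity_detector_sr.py | user_activity_detector
-- ===== SOURCE A (Python) =====
-- def user_activity_detector(logs: list[tuple]) -> list[str]:
--     """
--     Identifies users with duplicate activity logs.
--
--     Args:
--         logs (list[tuple]): A list of tuples, where each tuple represents a user activity log.
--                             The first element of each tuple is assumed to be the user identifier.
--
--     Returns:
--         list[str]: A list of user identifiers that appear more than once in the logs.
--     """
--     user_count = {}
--     for log in logs:
--         if log[0] not in user_count:
--             user_count[log[0]] = 1
--         else:
--             user_count[log[0]] += 1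
--     return [k for k, v in user_count.items() if v > 1]
-- ===== SOURCE B (Python) =====
-- def user_activity_detector(logs: list[tuple]) -> list[str]:
--     users = [log[0] for log in logs]
--     return [u for i, u in enumerate(users)
--             if u not in users[:i] and u in users[i + 1:]]
-- ===== Notes on version B (the rewrite author's own statement) =====
-- stated objective: alternative
-- what changed: Drops the counting dict entirely: B emits users[i] exactly when it is absent from the prefix users[:i] and present in the suffix users[i+1:], a brute-force nested-scan comprehension instead of A's single counting pass over a dict.
import Mathlib
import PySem

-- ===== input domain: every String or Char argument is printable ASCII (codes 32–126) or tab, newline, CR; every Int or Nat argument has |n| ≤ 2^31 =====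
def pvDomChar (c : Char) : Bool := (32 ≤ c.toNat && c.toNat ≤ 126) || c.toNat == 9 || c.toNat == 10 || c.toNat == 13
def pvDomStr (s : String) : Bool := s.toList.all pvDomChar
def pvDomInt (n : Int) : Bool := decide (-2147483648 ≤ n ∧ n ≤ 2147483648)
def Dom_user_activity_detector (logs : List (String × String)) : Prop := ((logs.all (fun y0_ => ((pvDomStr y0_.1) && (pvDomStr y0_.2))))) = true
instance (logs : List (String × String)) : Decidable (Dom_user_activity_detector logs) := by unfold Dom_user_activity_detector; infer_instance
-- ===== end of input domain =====

-- B drops A's counting dict entirely: it emits users[i] exactly when it is absent from the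
-- prefix users[:i] and present in the suffix users[i+1:] (a nested-scan comprehension).

-- ===== PORT A =====
-- the counting loop ('user_count' after the for-loop)
def uad_userCount (logs : List (String × String)) : PySem.Dict String Int :=
  logs.foldl (fun d log =>
      if PySem.Dict.contains d log.1 = false then PySem.Dict.insert d log.1 1
      -- 'user_count[log[0]] += 1': the key is present in this branch, so getD reads the stored value
      else PySem.Dict.insert d log.1 (PySem.Dict.getD d log.1 0 + 1))
    PySem.Dict.empty

def user_activity_detector (logs : List (String × String)) : List String :=
  ((uad_userCount logs).items.filter (fun kv => decide (1 < kv.2))).map (fun kv => kv.1)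

-- ===== PORT B =====
def user_activity_detector_alt (logs : List (String × String)) : List String :=
  let users := logs.map (fun log => log.1)
  ((PySem.List.enumerate users).filter (fun iu =>
      decide (iu.2 ∉ PySem.List.slice users none (some iu.1)) &&
      decide (iu.2 ∈ PySem.List.slice users (some (iu.1 + 1)) none))).map (fun iu => iu.2)

-- ===== PRECONDITION & SPEC =====
def Spec_user_activity_detector (logs : List (String × String)) (out : List String) : Prop := out = user_activity_detector_alt logs
instance (logs : List (String × String)) (out : List String) : Decidable (Spec_user_activity_detector logs out) := by unfold Spec_user_activity_detector; infer_instance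

-- ===== CLAIM (what is proved, stated in full; the proofs are below) =====
def Claim_equal_user_activity_detector : Prop := ∀ (logs : List (String × String)), Dom_user_activity_detector logs → Spec_user_activity_detector logs (user_activity_detector logs)

-- ===== LEMMAS AND PROOFS =====

-- A's dict-building loop is Counter(keys)
lemma a_fold_eq_counter (logs : List (String × String)) :
    uad_userCount logs = PySem.Dict.counter (logs.map (fun log => log.1)) := by
  unfold uad_userCount
  rw [PySem.List.foldl_congr_mem _ _
      (fun d log => PySem.Dict.insert d log.1 (PySem.Dict.getD d log.1 0 + 1)) _
      (by
        intro acc x _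
        by_cases h : PySem.Dict.contains acc x.1 = false
        · rw [if_pos h]
          show PySem.Dict.insert acc x.1 1 = PySem.Dict.insert acc x.1 (PySem.Dict.getD acc x.1 0 + 1)
          rw [PySem.Dict.getD_of_not_contains _ _ h]; norm_num
        · rw [if_neg h])]
  rw [← PySem.Dict.foldl_insert_getD_add_one_eq_counter, List.foldl_map]

-- B's comprehension over 'enumerate xs (pre.length)' with slices taken in 'pre ++ xs':
-- it lists, in first-occurrence order, the elements of xs outside pre occurring ≥ 2 times
lemma b_filter_eq (pre xs : List String) :
    ((PySem.List.enumerate xs (pre.length : Int)).filter (fun iu =>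
        decide (iu.2 ∉ PySem.List.slice (pre ++ xs) none (some iu.1)) &&
        decide (iu.2 ∈ PySem.List.slice (pre ++ xs) (some (iu.1 + 1)) none))).map (fun iu => iu.2)
    = (PySem.Set.ofList xs).filter (fun u => decide (u ∉ pre) && decide (2 ≤ xs.count u)) := by
  induction xs generalizing pre with
  | nil => simp [PySem.List.enumerate_nil, PySem.Set.ofList_nil]
  | cons x t ih =>
    have h1 : PySem.List.slice (pre ++ x :: t) none (some ((pre.length : Nat) : Int)) = pre := by
      rw [PySem.List.slice_to_natCast, List.take_left]
    have h2 : PySem.List.slice (pre ++ x :: t) (some (((pre.length : Nat) : Int) + 1)) none = t := by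
      have h : ((pre.length : Nat) : Int) + 1 = (((pre ++ [x]).length : Nat) : Int) := by simp
      rw [h, PySem.List.slice_from_natCast, show pre ++ x :: t = (pre ++ [x]) ++ t by simp,
        List.drop_left]
    have hstep : ((pre.length : Int) + 1) = (((pre ++ [x]).length : Nat) : Int) := by simp
    have happ : pre ++ x :: t = (pre ++ [x]) ++ t := by simp
    rw [PySem.List.enumerate_cons, PySem.Set.ofList_cons, List.filter_cons, List.filter_cons]
    simp only [h1, h2]
    have htail :
        ((PySem.List.enumerate t ((pre.length : Int) + 1)).filter (fun iu =>
            decide (iu.2 ∉ PySem.List.slice (pre ++ x :: t) none (some iu.1)) &&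
            decide (iu.2 ∈ PySem.List.slice (pre ++ x :: t) (some (iu.1 + 1)) none))).map (fun iu => iu.2)
        = ((PySem.Set.ofList t).filter (fun y => !(y == x))).filter
            (fun u => decide (u ∉ pre) && decide (2 ≤ (x :: t).count u)) := by
      rw [hstep, happ, ih (pre ++ [x]), List.filter_filter]
      apply List.filter_congr
      intro u hu
      by_cases hux : u = x
      · simp [hux]
      · simp [hux, List.mem_append, Ne.symm hux]
    by_cases hc : x ∉ pre ∧ x ∈ t
    · have hcnt : 2 ≤ (x :: t).count x := by
        have hpos := List.count_pos_iff.mpr hc.2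
        simp only [List.count_cons_self]
        omega
      rw [if_pos (by simp only [Bool.and_eq_true, decide_eq_true_eq]; exact ⟨hc.1, hc.2⟩),
        if_pos (by simp only [Bool.and_eq_true, decide_eq_true_eq]; exact ⟨hc.1, hcnt⟩),
        List.map_cons, htail]
      rfl
    · have hcnt : ¬ 2 ≤ (x :: t).count x ∨ x ∈ pre := by
        by_cases hp : x ∈ pre
        · exact Or.inr hp
        · left
          intro h
          exact hc ⟨hp, List.count_pos_iff.mp (by simp only [List.count_cons_self] at h; omega)⟩
      have hnA : ¬ (decide (x ∉ pre) && decide (x ∈ t)) = true := by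
        intro h
        simp only [Bool.and_eq_true, decide_eq_true_eq] at h
        exact hc h
      have hnB : ¬ (decide (x ∉ pre) && decide (2 ≤ (x :: t).count x)) = true := by
        intro h
        simp only [Bool.and_eq_true, decide_eq_true_eq] at h
        rcases hcnt with h1 | h1
        · exact h1 h.2
        · exact h.1 h1
      rw [if_neg hnA, if_neg hnB, htail]
      rfl

-- ===== VERDICT (by name: the statement is the Claim_ definition above) =====
theorem user_activity_detector_spec : Claim_equal_user_activity_detector := by
  intro logs _
  unfold Spec_user_activity_detector user_activity_detector user_activity_detector_alt
  rw [a_fold_eq_counter, PySem.Dict.items_counter]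
  rw [List.filter_map, List.map_map]
  simp only [Function.comp_def]
  rw [List.map_id']
  have hb := b_filter_eq [] (logs.map (fun log => log.1))
  simp only [List.nil_append, List.not_mem_nil, not_false_eq_true, decide_true,
    Bool.true_and] at hb
  refine Eq.trans ?_ hb.symm
  apply List.filter_congr
  intro x _
  rw [decide_eq_decide]
  omega
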